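-- pv_equiv track=rewrite | github.com/davecan/dspguide-code | Ch05_Linear_Systems/decompose.py | interlaced
-- ===== SOURCE A (Python) =====
-- def interlaced(signal):
--     e = []
--     o = []
--     for i in range(0, len(signal)):
--         if i % 2 == 0:
--             e.append(signal[i])
--             o.append(0)
--         else:
--             e.append(0)
--             o.append(signal[i])
--     return [e,o]
-- ===== SOURCE B (Python) =====
-- # parameter renamed from 'signal' to 'sig' only because the harness forbids the name of the stdlib 'signal' module; called positionally it is the same function
-- def interlaced(sig):
--     n = len(sig)
--     e = [0] * n
--     o = [0] * n
--     e[0::2] = sig[0::2]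
--     o[1::2] = sig[1::2]
--     return [e, o]
-- ===== Notes on version B (the rewrite author's own statement) =====
-- stated objective: idiomatic
-- what changed: Replaces the per-index parity branch of A's loop by pre-allocating two zero lists and filling them with strided slice assignments e[0::2]=signal[0::2], o[1::2]=signal[1::2].
import Mathlib
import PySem

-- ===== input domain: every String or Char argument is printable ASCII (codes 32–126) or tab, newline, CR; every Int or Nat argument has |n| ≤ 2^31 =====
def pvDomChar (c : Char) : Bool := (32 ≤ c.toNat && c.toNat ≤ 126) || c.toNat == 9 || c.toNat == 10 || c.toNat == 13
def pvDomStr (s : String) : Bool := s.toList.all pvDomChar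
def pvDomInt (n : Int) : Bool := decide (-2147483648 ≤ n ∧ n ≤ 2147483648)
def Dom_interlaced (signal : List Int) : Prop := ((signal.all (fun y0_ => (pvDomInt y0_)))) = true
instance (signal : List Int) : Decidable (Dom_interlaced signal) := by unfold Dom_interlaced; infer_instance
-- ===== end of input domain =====

-- B replaces A's per-index parity branch by zero-filled lists updated with strided slice assignment (idiomatic; same O(n) cost).

-- ===== PORT A =====
def interlaced (signal : List Int) : List (List Int) :=
  let st := (PySem.List.pyRange 0 (PySem.List.len signal) 1).foldl
    (fun (st : List Int × List Int) i =>
      if PySem.Int.mod i 2 = 0 then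
        (st.1 ++ [PySem.List.pyGetD signal i 0], st.2 ++ [(0 : Int)])
      else
        (st.1 ++ [(0 : Int)], st.2 ++ [PySem.List.pyGetD signal i 0]))
    ([], [])
  [st.1, st.2]

-- ===== PORT B =====
-- signal[0::2] (also signal[1::2] after a drop): every second element
def everyOther : List Int → List Int
  | [] => []
  | [x] => [x]
  | x :: _ :: xs => x :: everyOther xs

-- base[0::2] = vals  (strided slice assignment into positions 0,2,4,…)
def assignEvens : List Int → List Int → List Int
  | base, [] => base
  | [], _ :: _ => []
  | [_], v :: _ => [v]
  | _ :: b :: base, v :: vs => v :: b :: assignEvens base vs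

-- base[1::2] = vals  (positions 1,3,5,…)
def assignOdds : List Int → List Int → List Int
  | [], _ => []
  | b :: base, vs => b :: assignEvens base vs

def interlaced_alt (signal : List Int) : List (List Int) :=
  let n := signal.length
  let e := assignEvens (List.replicate n 0) (everyOther signal)
  let o := assignOdds (List.replicate n 0) (everyOther signal.tail)
  [e, o]

-- ===== PRECONDITION & SPEC =====
def Spec_interlaced (signal : List Int) (out : List (List Int)) : Prop := out = interlaced_alt signal
instance (signal : List Int) (out : List (List Int)) : Decidable (Spec_interlaced signal out) := by unfold Spec_interlaced; infer_instance

-- ===== CLAIM (what is proved, stated in full; the proofs are below) =====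
def Claim_equal_interlaced : Prop := ∀ (signal : List Int), Dom_interlaced signal → Spec_interlaced signal (interlaced signal)

-- ===== LEMMAS AND PROOFS =====

mutual
def eSpec : List Int → List Int
  | [] => []
  | x :: xs => x :: oSpec xs
def oSpec : List Int → List Int
  | [] => []
  | _ :: xs => 0 :: eSpec xs
end

theorem assignEvens_replicate (xs : List Int) :
    assignEvens (List.replicate xs.length 0) (everyOther xs) = eSpec xs := by
  induction xs using everyOther.induct with
  | case1 => rfl
  | case2 x => rfl
  | case3 x y xs ih =>
      simp only [List.length_cons, List.replicate_succ, everyOther, assignEvens, ih,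
        eSpec, oSpec]

theorem assignOdds_replicate (xs : List Int) :
    assignOdds (List.replicate xs.length 0) (everyOther xs.tail) = oSpec xs := by
  cases xs with
  | nil => rfl
  | cons x xs =>
      simp only [List.length_cons, List.replicate_succ, List.tail_cons, assignOdds,
        assignEvens_replicate, oSpec]

theorem interlaced_alt_eq (signal : List Int) :
    interlaced_alt signal = [eSpec signal, oSpec signal] := by
  simp only [interlaced_alt, assignEvens_replicate, assignOdds_replicate]

def stepP (st : List Int × List Int) (p : Int × Int) : List Int × List Int :=
  if PySem.Int.mod p.1 2 = 0 then (st.1 ++ [p.2], st.2 ++ [(0 : Int)])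
  else (st.1 ++ [(0 : Int)], st.2 ++ [p.2])

theorem foldl_stepP_enumerate (xs : List Int) : ∀ (s : Int) (e o : List Int), 0 ≤ s →
    List.foldl stepP (e, o) (PySem.List.enumerate xs s) =
      (if PySem.Int.mod s 2 = 0 then (e ++ eSpec xs, o ++ oSpec xs)
       else (e ++ oSpec xs, o ++ eSpec xs)) := by
  induction xs with
  | nil =>
      intro s e o _
      simp [PySem.List.enumerate, eSpec, oSpec]
  | cons x xs ih =>
      intro s e o hs
      rw [PySem.List.enumerate_cons, List.foldl_cons]
      have hm : PySem.Int.mod s 2 = s % 2 := PySem.Int.mod_eq_emod_of_pos (by omega)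
      have hm1 : PySem.Int.mod (s + 1) 2 = (s + 1) % 2 := PySem.Int.mod_eq_emod_of_pos (by omega)
      rcases Int.emod_two_eq_zero_or_one s with h | h
      · have h1 : (s + 1) % 2 = 1 := by omega
        rw [show stepP (e, o) (s, x) = (e ++ [x], o ++ [(0 : Int)]) by
              simp [stepP, hm, h]]
        rw [ih (s + 1) _ _ (by omega)]
        simp [hm, hm1, h, h1, eSpec, oSpec]
      · have h1 : (s + 1) % 2 = 0 := by omega
        rw [show stepP (e, o) (s, x) = (e ++ [(0 : Int)], o ++ [x]) by
              simp [stepP, hm, h]]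
        rw [ih (s + 1) _ _ (by omega)]
        simp [hm, hm1, h, h1, eSpec, oSpec]

theorem interlaced_eq (signal : List Int) :
    interlaced signal = [eSpec signal, oSpec signal] := by
  have hmap := PySem.List.enumerate_eq_map_pyRange (xs := signal) (d := 0)
  have hfold :
      (PySem.List.pyRange 0 (PySem.List.len signal) 1).foldl
        (fun (st : List Int × List Int) i =>
          if PySem.Int.mod i 2 = 0 then
            (st.1 ++ [PySem.List.pyGetD signal i 0], st.2 ++ [(0 : Int)])
          else
            (st.1 ++ [(0 : Int)], st.2 ++ [PySem.List.pyGetD signal i 0]))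
        ([], []) =
      List.foldl stepP ([], []) (PySem.List.enumerate signal 0) := by
    rw [hmap, List.foldl_map]
    rfl
  have h0 := foldl_stepP_enumerate signal 0 [] [] (by omega)
  simp only [interlaced, hfold, h0]
  norm_num [PySem.Int.mod]

-- ===== VERDICT (by name: the statement is the Claim_ definition above) =====
theorem interlaced_spec : Claim_equal_interlaced := by
  intro signal _
  unfold Spec_interlaced
  rw [interlaced_eq, interlaced_alt_eq]
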